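-- pv_equiv track=rewrite | github.com/agent-wrangler/AaronCore | desktop.py | _select_native_lang
-- ===== SOURCE A (Python) =====
-- def _normalize_lang_list(values) -> list[str]:
--     items = values if isinstance(values, list) else ([values] if values else [])
--     normalized = []
--     seen = set()
--     for value in items:
--         lang = str(value or "").strip()
--         key = lang.lower()
--         if not lang or key in seen:
--             continue
--         seen.add(key)
--         normalized.append(lang)
--     return normalized
--
-- def _select_native_lang(requested_lang: str | None, available_langs: list[str]) -> str:
--     langs = _normalize_lang_list(available_langs)
--     requested = str(requested_lang or "").strip()
--     if not langs:
--         return ""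
--     if not requested:
--         return langs[0]
--     lowered = requested.lower()
--     for lang in langs:
--         if lang.lower() == lowered:
--             return lang
--     prefix = lowered.split("-", 1)[0]
--     if prefix:
--         for lang in langs:
--             lang_lower = lang.lower()
--             if lang_lower == prefix or lang_lower.startswith(prefix + "-"):
--                 return lang
--     return ""
-- ===== SOURCE B (Python) =====
-- def _select_native_lang(requested_lang, available_langs):
--     requested = str(requested_lang or "").strip()
--     lowered = requested.lower()
--     prefix = lowered.split("-", 1)[0]
--     prefix_hit = None
--     items = available_langs if isinstance(available_langs, list) else ([available_langs] if available_langs else [])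
--     for value in items:
--         lang = str(value or "").strip()
--         if not lang:
--             continue
--         if not requested:
--             return lang
--         lang_lower = lang.lower()
--         if lang_lower == lowered:
--             return lang
--         if prefix and prefix_hit is None and (lang_lower == prefix or lang_lower.startswith(prefix + "-")):
--             prefix_hit = lang
--     return prefix_hit if prefix_hit is not None else ""
-- ===== Notes on version B (the rewrite author's own statement) =====
-- stated objective: alternative
-- what changed: B replaces A's three passes (build a deduplicated list with a seen-set, then an exact-match scan, then a prefix-match scan) by one single pass over the raw list that strips each entry, returns the first non-empty entry when the request is empty, returns immediately on the first case-insensitive exact match, and records only the first prefix candidate as a fallback; no intermediate list or set is built, which is sound because all three scans' predicates depend only on the lowercased entry, making deduplication irrelevant to the result.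
import Mathlib
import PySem

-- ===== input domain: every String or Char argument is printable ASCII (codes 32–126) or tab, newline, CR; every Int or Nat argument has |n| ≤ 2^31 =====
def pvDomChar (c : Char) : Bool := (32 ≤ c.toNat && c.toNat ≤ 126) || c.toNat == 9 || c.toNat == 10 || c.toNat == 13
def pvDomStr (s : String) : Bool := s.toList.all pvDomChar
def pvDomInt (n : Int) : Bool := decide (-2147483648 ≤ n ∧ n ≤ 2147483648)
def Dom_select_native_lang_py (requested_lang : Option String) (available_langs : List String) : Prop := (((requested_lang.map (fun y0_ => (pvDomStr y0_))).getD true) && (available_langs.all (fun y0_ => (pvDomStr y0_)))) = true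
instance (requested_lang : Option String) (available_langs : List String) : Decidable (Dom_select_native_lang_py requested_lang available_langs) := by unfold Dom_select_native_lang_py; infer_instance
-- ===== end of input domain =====

-- B fuses A's three passes (dedup-normalize, exact scan, prefix scan) into one pass over the
-- raw list with no intermediate list or seen-set; same return value (alternative decomposition).

-- ===== PORT A =====
-- _normalize_lang_list's loop: state (seen, normalized)
def normLoopA (items : List String) (seen : PySem.Set String) (normalized : List String) : List String :=
  match items with
  | [] => normalized
  | value :: rest =>
    let lang := PySem.Str.strip value
    let key := PySem.Str.lower lang
    if lang = "" || PySem.Set.contains seen key then normLoopA rest seen normalized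
    else normLoopA rest (PySem.Set.add seen key) (normalized ++ [lang])

def normalize_lang_list (values : List String) : List String :=
  normLoopA values PySem.Set.empty []

-- first loop of _select_native_lang (returns the matching lang, none = loop fell through)
def findExactA (langs : List String) (lowered : String) : Option String :=
  match langs with
  | [] => none
  | lang :: rest =>
    if PySem.Str.lower lang == lowered then some lang else findExactA rest lowered

-- second loop of _select_native_lang
def findPrefA (langs : List String) (pfx : String) : Option String :=
  match langs with
  | [] => none
  | lang :: rest =>
    let lang_lower := PySem.Str.lower lang
    if lang_lower == pfx || PySem.Str.startswith lang_lower (pfx ++ "-") then some lang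
    else findPrefA rest pfx

def select_native_lang_py (requested_lang : Option String) (available_langs : List String) : String :=
  let langs := normalize_lang_list available_langs
  let requested := PySem.Str.strip (requested_lang.getD "")
  if langs = [] then ""
  else if requested = "" then langs.headD ""   -- langs[0]; guarded non-empty
  else
    let lowered := PySem.Str.lower requested
    match findExactA langs lowered with
    | some lang => lang
    | none =>
      let pfx := ((PySem.Str.splitMax? lowered "-" 1).getD []).headD ""  -- lowered.split("-",1)[0]
      if pfx ≠ "" then (findPrefA langs pfx).getD "" else ""

-- ===== PORT B =====
-- the single fused loop of Source B; `hit` is prefix_hit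
def selAltLoop (items : List String) (requested lowered pfx : String) (hit : Option String) : String :=
  match items with
  | [] => hit.getD ""
  | value :: rest =>
    let lang := PySem.Str.strip value
    if lang = "" then selAltLoop rest requested lowered pfx hit
    else if requested = "" then lang
    else
      let lang_lower := PySem.Str.lower lang
      if lang_lower == lowered then lang
      else
        let hit' := if pfx != "" && hit.isNone
                        && (lang_lower == pfx || PySem.Str.startswith lang_lower (pfx ++ "-"))
                    then some lang else hit
        selAltLoop rest requested lowered pfx hit'

def select_native_lang_py_alt (requested_lang : Option String) (available_langs : List String) : String :=
  let requested := PySem.Str.strip (requested_lang.getD "")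
  let lowered := PySem.Str.lower requested
  let pfx := ((PySem.Str.splitMax? lowered "-" 1).getD []).headD ""
  selAltLoop available_langs requested lowered pfx none

-- ===== PRECONDITION & SPEC =====
def Spec_select_native_lang_py (requested_lang : Option String) (available_langs : List String) (out : String) : Prop := out = select_native_lang_py_alt requested_lang available_langs
instance (requested_lang : Option String) (available_langs : List String) (out : String) : Decidable (Spec_select_native_lang_py requested_lang available_langs out) := by unfold Spec_select_native_lang_py; infer_instance

-- ===== CLAIM (what is proved, stated in full; the proofs are below) =====
def Claim_equal_select_native_lang_py : Prop := ∀ (requested_lang : Option String) (available_langs : List String), Dom_select_native_lang_py requested_lang available_langs → Spec_select_native_lang_py requested_lang available_langs (select_native_lang_py requested_lang available_langs)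

-- ===== LEMMAS AND PROOFS =====

-- proof-side helpers: the stripped non-empty entries, dedup-by-lower, generic first-match
def cleanL : List String → List String
  | [] => []
  | v :: rest =>
    let lang := PySem.Str.strip v
    if lang = "" then cleanL rest else lang :: cleanL rest

def dedupK (seen : PySem.Set String) : List String → List String
  | [] => []
  | l :: rest =>
    let k := PySem.Str.lower l
    if PySem.Set.contains seen k then dedupK seen rest
    else l :: dedupK (PySem.Set.add seen k) rest

def findP (p : String → Bool) : List String → Option String
  | [] => none
  | l :: rest => if p (PySem.Str.lower l) then some l else findP p rest

lemma normLoopA_eq (items : List String) : ∀ (seen : PySem.Set String) (acc : List String),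
    normLoopA items seen acc = acc ++ dedupK seen (cleanL items) := by
  induction items with
  | nil => intro seen acc; simp [normLoopA, cleanL, dedupK]
  | cons v rest ih =>
    intro seen acc
    simp only [normLoopA, cleanL]
    by_cases h : PySem.Str.strip v = ""
    · simp [h, ih]
    · simp only [h, if_false, Bool.false_or, dedupK]
      by_cases hc : PySem.Str.lower (PySem.Str.strip v) ∈ seen
      · simp [hc, ih]
      · simp [hc, ih, List.append_assoc]

lemma findExactA_eq (langs : List String) (lo : String) :
    findExactA langs lo = findP (fun k => k == lo) langs := by
  induction langs with
  | nil => rfl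
  | cons l rest ih => simp [findExactA, findP, ih]

lemma findPrefA_eq (langs : List String) (pfx : String) :
    findPrefA langs pfx
      = findP (fun k => k == pfx || PySem.Str.startswith k (pfx ++ "-")) langs := by
  induction langs with
  | nil => rfl
  | cons l rest ih => simp [findPrefA, findP, ih]

-- dedup-by-lower does not change a first-match scan whose predicate only looks at the lowered value,
-- provided no key already in `seen` satisfies it
lemma findP_dedupK (p : String → Bool) : ∀ (cs : List String) (seen : PySem.Set String),
    (∀ s ∈ seen, p s = false) → findP p (dedupK seen cs) = findP p cs := by
  intro cs
  induction cs with
  | nil => intro seen _; rfl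
  | cons l rest ih =>
    intro seen hseen
    simp only [dedupK, findP]
    by_cases hc : PySem.Str.lower l ∈ seen
    · rw [if_pos (by simpa using hc)]
      rw [ih seen hseen, hseen _ hc]
      simp
    · rw [if_neg (by simpa using hc)]
      simp only [findP]
      by_cases hp : p (PySem.Str.lower l)
      · simp [hp]
      · have hseen' : ∀ s ∈ PySem.Set.add seen (PySem.Str.lower l), p s = false := by
          intro s hs
          rcases (PySem.Set.mem_add _ _ _).mp hs with h | h
          · exact hseen _ h
          · subst h; simpa using hp
        simp [hp, ih _ hseen']

-- the fused loop, characterised in terms of the clean list and the two scans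
set_option maxHeartbeats 1000000 in
lemma selAltLoop_eq (items : List String) : ∀ (r lo pf : String) (hit : Option String),
    selAltLoop items r lo pf hit =
      if r = "" then (cleanL items).headD (hit.getD "")
      else match findExactA (cleanL items) lo with
        | some l => l
        | none =>
          match hit with
          | some h => h
          | none => if pf = "" then "" else (findPrefA (cleanL items) pf).getD "" := by
  induction items with
  | nil =>
    intro r lo pf hit
    simp only [selAltLoop, cleanL, findExactA, findPrefA]
    by_cases hr : r = "" <;> cases hit <;> simp [hr]
  | cons v rest ih =>
    intro r lo pf hit
    simp only [selAltLoop, cleanL]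
    by_cases hl : PySem.Str.strip v = ""
    · simp [hl, ih]
    · simp only [hl, if_false]
      by_cases hr : r = ""
      · simp [hr]
      · rw [if_neg hr, if_neg hr]
        simp only [findExactA]
        by_cases hex : (PySem.Str.lower (PySem.Str.strip v) == lo) = true
        · simp [hex]
        · simp only [hex, if_false, ih, hr]
          cases hfe : findExactA (cleanL rest) lo with
          | some l => simp [hex, hfe]
          | none =>
            cases hit with
            | some h => simp [hex, hfe]
            | none =>
              by_cases hpf : pf = ""
              · simp [hex, hfe, hpf]
              · simp only [findPrefA]
                by_cases hq : PySem.Str.lower (PySem.Str.strip v) = pf ∨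
                    PySem.Chars.startswith (PySem.Chars.lower (PySem.Chars.strip v.toList)) (pf.toList ++ ['-']) = true
                all_goals simp [hex, hfe, hpf, hq]

-- ===== VERDICT (by name: the statement is the Claim_ definition above) =====
theorem select_native_lang_py_spec : Claim_equal_select_native_lang_py := by
  unfold Claim_equal_select_native_lang_py
  intro rl al _
  unfold Spec_select_native_lang_py select_native_lang_py select_native_lang_py_alt
    normalize_lang_list
  rw [normLoopA_eq, selAltLoop_eq]
  simp only [List.nil_append, findExactA_eq, findPrefA_eq]
  rw [findP_dedupK _ _ _ (by simp [PySem.Set.empty]),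
      findP_dedupK _ _ _ (by simp [PySem.Set.empty])]
  cases hc : cleanL al with
  | nil => simp [dedupK, findP]
  | cons l cs =>
    simp only [dedupK]
    by_cases hr : PySem.Str.strip (rl.getD "") = "" <;>
      simp [hr, PySem.Set.contains]
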